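-- pv_equiv track=rewrite | github.com/sitharaj88/node-wifi | src/macOS/scan/scan_ssids.py | frequency_from_channel
-- ===== SOURCE A (Python) =====
-- def frequency_from_channel(channel):
--     channels = {
--         **{i: 2412 + 5 * (i - 1) for i in range(1, 15)},
--         **{i: 5180 + 10 * (i - 36) for i in range(36, 65, 2)},
--         **{i: 5500 + 10 * (i - 100) for i in range(100, 145, 2)},
--         **{i: 5745 + 10 * (i - 149) for i in range(149, 162, 2)},
--         165: 5825,
--         169: 5845,
--         173: 5865
--     }
--     return channels.get(int(channel), None)
-- ===== SOURCE B (Python) =====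
-- def frequency_from_channel(channel):
--     ch = int(channel)
--     if 1 <= ch <= 14:
--         return 2412 + 5 * (ch - 1)
--     if 36 <= ch <= 64 and ch % 2 == 0:
--         return 5180 + 10 * (ch - 36)
--     if 100 <= ch <= 144 and ch % 2 == 0:
--         return 5500 + 10 * (ch - 100)
--     if 149 <= ch <= 161 and ch % 2 == 1:
--         return 5745 + 10 * (ch - 149)
--     if ch == 165:
--         return 5825
--     if ch == 169:
--         return 5845
--     if ch == 173:
--         return 5865
--     return None
-- ===== Notes on version B (the rewrite author's own statement) =====
-- stated objective: simpler
-- what changed: Replaces building a full dict table per call with direct range tests and per-band closed-form arithmetic.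
import Mathlib
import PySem

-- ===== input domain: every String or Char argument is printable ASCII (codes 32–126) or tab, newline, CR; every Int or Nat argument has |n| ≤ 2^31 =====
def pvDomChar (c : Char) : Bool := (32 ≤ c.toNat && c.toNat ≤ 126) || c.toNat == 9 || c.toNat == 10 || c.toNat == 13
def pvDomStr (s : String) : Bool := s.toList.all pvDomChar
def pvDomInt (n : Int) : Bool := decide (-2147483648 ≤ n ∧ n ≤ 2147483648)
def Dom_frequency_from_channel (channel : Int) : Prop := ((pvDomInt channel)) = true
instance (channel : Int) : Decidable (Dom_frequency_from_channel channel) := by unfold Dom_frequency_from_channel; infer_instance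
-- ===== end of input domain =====

set_option maxRecDepth 4000


-- B is simpler/cheaper: per-band range tests with closed-form arithmetic instead of building the whole dict table on every call.

-- ===== PORT A =====
-- the dict literal built inside A (comprehensions over ranges, then three fixed entries)
def pvChannelsA : PySem.Dict Int Int :=
  let d := (PySem.List.pyRange 1 15 1).foldl
    (fun d i => d.insert i (2412 + 5 * (i - 1))) PySem.Dict.empty
  let d := (PySem.List.pyRange 36 65 2).foldl
    (fun d i => d.insert i (5180 + 10 * (i - 36))) d
  let d := (PySem.List.pyRange 100 145 2).foldl
    (fun d i => d.insert i (5500 + 10 * (i - 100))) d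
  let d := (PySem.List.pyRange 149 162 2).foldl
    (fun d i => d.insert i (5745 + 10 * (i - 149))) d
  ((d.insert 165 5825).insert 169 5845).insert 173 5865

def frequency_from_channel (channel : Int) : Option Int :=
  pvChannelsA.get? channel

-- ===== PORT B =====
-- (Python's ch = int(channel) is the identity on Int)
def frequency_from_channel_alt (channel : Int) : Option Int :=
  if 1 ≤ channel ∧ channel ≤ 14 then some (2412 + 5 * (channel - 1))
  else if 36 ≤ channel ∧ channel ≤ 64 ∧ channel % 2 = 0 then some (5180 + 10 * (channel - 36))
  else if 100 ≤ channel ∧ channel ≤ 144 ∧ channel % 2 = 0 then some (5500 + 10 * (channel - 100))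
  else if 149 ≤ channel ∧ channel ≤ 161 ∧ channel % 2 = 1 then some (5745 + 10 * (channel - 149))
  else if channel = 165 then some 5825
  else if channel = 169 then some 5845
  else if channel = 173 then some 5865
  else none

-- ===== PRECONDITION & SPEC =====
def Spec_frequency_from_channel (channel : Int) (out : Option Int) : Prop := out = frequency_from_channel_alt channel
instance (channel : Int) (out : Option Int) : Decidable (Spec_frequency_from_channel channel out) := by unfold Spec_frequency_from_channel; infer_instance

-- ===== CLAIM (what is proved, stated in full; the proofs are below) =====
def Claim_equal_frequency_from_channel : Prop := ∀ (channel : Int), Dom_frequency_from_channel channel → Spec_frequency_from_channel channel (frequency_from_channel channel)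

-- ===== LEMMAS AND PROOFS =====

-- the keys of A's dict, as a concrete list (checked by kernel evaluation)
lemma pvChannelsA_keys :
    pvChannelsA.keys = [(1 : Int), 2, 3, 4, 5, 6, 7, 8, 9, 10, 11, 12, 13, 14, 36, 38, 40, 42, 44, 46, 48, 50, 52, 54, 56, 58, 60, 62, 64, 100, 102, 104, 106, 108, 110, 112, 114, 116, 118, 120, 122, 124, 126, 128, 130, 132, 134, 136, 138, 140, 142, 144, 149, 151, 153, 155, 157, 159, 161, 165, 169, 173] := by
  decide

lemma pvA_get_none_of_out (ch : Int) (h : ch < 1 ∨ 173 < ch) :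
    pvChannelsA.get? ch = none := by
  rw [PySem.Dict.get?_eq_none_iff_not_mem_keys, pvChannelsA_keys]
  intro hmem
  simp only [List.mem_cons, List.not_mem_nil, or_false] at hmem
  omega

lemma pvAlt_none_of_out (ch : Int) (h : ch < 1 ∨ 173 < ch) :
    frequency_from_channel_alt ch = none := by
  unfold frequency_from_channel_alt
  split_ifs <;> first | rfl | (exfalso; omega)

lemma pv_agree_in (ch : Int) (h1 : 1 ≤ ch) (h2 : ch ≤ 173) :
    frequency_from_channel ch = frequency_from_channel_alt ch := by
  interval_cases ch <;> decide

-- ===== VERDICT (by name: the statement is the Claim_ definition above) =====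
theorem frequency_from_channel_spec : Claim_equal_frequency_from_channel := by
  intro ch _
  unfold Spec_frequency_from_channel
  by_cases h1 : 1 ≤ ch
  · by_cases h2 : ch ≤ 173
    · exact pv_agree_in ch h1 h2
    · rw [show frequency_from_channel ch = pvChannelsA.get? ch from rfl,
        pvA_get_none_of_out ch (Or.inr (by omega)), pvAlt_none_of_out ch (Or.inr (by omega))]
  · rw [show frequency_from_channel ch = pvChannelsA.get? ch from rfl,
      pvA_get_none_of_out ch (Or.inl (by omega)), pvAlt_none_of_out ch (Or.inl (by omega))]
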